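-- pv_equiv track=rewrite | github.com/0xtreme/Indian-food-Melbourne-stats | prepare_data.py | classify_cuisine
-- ===== SOURCE A (Python) =====
-- def classify_cuisine(name):
--     """Classify an Indian restaurant's sub-cuisine from its name."""
--     name_lower = name.lower()
--     if any(w in name_lower for w in ["dosa", "south", "kerala", "chettinad", "udupi", "madras", "idli", "appam", "malabar"]):
--         return "south_indian"
--     elif any(w in name_lower for w in ["sri lanka", "colombo", "jaffna", "ceylon", "hopper"]):
--         return "sri_lankan"
--     elif any(w in name_lower for w in ["nepal", "gurkha", "himalaya", "everest", "momo", "sherpa", "kathmandu"]):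
--         return "nepalese"
--     elif any(w in name_lower for w in ["bangla", "dhaka", "bengal", "sylhet"]):
--         return "bangladeshi"
--     elif any(w in name_lower for w in ["tandoori", "punjab", "mughal", "nawab", "delhi", "lucknow", "biryani", "naan", "tikka", "butter chicken", "roti"]):
--         return "north_indian"
--     else:
--         return "general"
-- ===== SOURCE B (Python) =====
-- _LABELS = ["south_indian", "sri_lankan", "nepalese", "bangladeshi", "north_indian"]
--
-- # Every keyword flattened with the priority (index) of its cuisine label.
-- _KEYWORDS = (
--     [(kw, 0) for kw in ["dosa", "south", "kerala", "chettinad", "udupi", "madras", "idli", "appam", "malabar"]]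
--     + [(kw, 1) for kw in ["sri lanka", "colombo", "jaffna", "ceylon", "hopper"]]
--     + [(kw, 2) for kw in ["nepal", "gurkha", "himalaya", "everest", "momo", "sherpa", "kathmandu"]]
--     + [(kw, 3) for kw in ["bangla", "dhaka", "bengal", "sylhet"]]
--     + [(kw, 4) for kw in ["tandoori", "punjab", "mughal", "nawab", "delhi", "lucknow", "biryani", "naan", "tikka", "butter chicken", "roti"]]
-- )
--
--
-- def classify_cuisine(name):
--     """Classify an Indian restaurant's sub-cuisine from its name.
--
--     Single anchored scan over the text: at each position of the lowercased
--     name, test which keywords match starting there, and keep the minimum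
--     label priority seen; no substring operator, no per-group pass.
--     """
--     low = name.lower()
--     best = len(_LABELS)
--     for i in range(len(low) + 1):
--         for kw, pri in _KEYWORDS:
--             if pri < best and low.startswith(kw, i):
--                 best = pri
--     return _LABELS[best] if best < len(_LABELS) else "general"
-- ===== Notes on version B (the rewrite author's own statement) =====
-- stated objective: alternative
-- what changed: Instead of A's per-group substring tests in an if/elif chain, B flattens all keywords with a numeric priority and makes one anchored scan over the positions of the lowercased name, testing prefix matches at each position and keeping the minimum matched priority, which indexes the label table at the end.
import Mathlib
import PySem

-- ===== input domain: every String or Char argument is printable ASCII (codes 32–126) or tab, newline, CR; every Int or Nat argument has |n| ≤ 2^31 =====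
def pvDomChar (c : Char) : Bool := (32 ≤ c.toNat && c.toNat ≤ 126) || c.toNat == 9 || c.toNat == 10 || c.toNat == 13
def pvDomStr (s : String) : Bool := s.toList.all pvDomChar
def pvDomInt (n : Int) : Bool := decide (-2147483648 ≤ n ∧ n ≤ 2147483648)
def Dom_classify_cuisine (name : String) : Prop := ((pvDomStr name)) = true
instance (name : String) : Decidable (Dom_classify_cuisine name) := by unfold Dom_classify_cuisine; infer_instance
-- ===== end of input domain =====

-- B replaces A's five per-group substring tests by a single anchored scan over the
-- positions of the lowercased name, keeping the minimum label priority of any keyword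
-- matching at any position (objective: alternative; same complexity class).

-- ===== PORT A =====
def classify_cuisine (name : String) : String :=
  let name_lower := PySem.Str.lower name
  if (["dosa", "south", "kerala", "chettinad", "udupi", "madras", "idli", "appam", "malabar"].any
      (fun w => PySem.Str.isIn w name_lower)) then "south_indian"
  else if (["sri lanka", "colombo", "jaffna", "ceylon", "hopper"].any
      (fun w => PySem.Str.isIn w name_lower)) then "sri_lankan"
  else if (["nepal", "gurkha", "himalaya", "everest", "momo", "sherpa", "kathmandu"].any
      (fun w => PySem.Str.isIn w name_lower)) then "nepalese"
  else if (["bangla", "dhaka", "bengal", "sylhet"].any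
      (fun w => PySem.Str.isIn w name_lower)) then "bangladeshi"
  else if (["tandoori", "punjab", "mughal", "nawab", "delhi", "lucknow", "biryani", "naan", "tikka", "butter chicken", "roti"].any
      (fun w => PySem.Str.isIn w name_lower)) then "north_indian"
  else "general"

-- ===== PORT B =====
def pvLabels : List String := ["south_indian", "sri_lankan", "nepalese", "bangladeshi", "north_indian"]

-- Source B's _KEYWORDS: every keyword with the priority (index) of its label, flattened.
def pvKW : List (String × Nat) :=
  [("dosa", 0), ("south", 0), ("kerala", 0), ("chettinad", 0), ("udupi", 0), ("madras", 0), ("idli", 0), ("appam", 0), ("malabar", 0),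
   ("sri lanka", 1), ("colombo", 1), ("jaffna", 1), ("ceylon", 1), ("hopper", 1),
   ("nepal", 2), ("gurkha", 2), ("himalaya", 2), ("everest", 2), ("momo", 2), ("sherpa", 2), ("kathmandu", 2),
   ("bangla", 3), ("dhaka", 3), ("bengal", 3), ("sylhet", 3),
   ("tandoori", 4), ("punjab", 4), ("mughal", 4), ("nawab", 4), ("delhi", 4), ("lucknow", 4), ("biryani", 4), ("naan", 4), ("tikka", 4), ("butter chicken", 4), ("roti", 4)]

-- Python's low.startswith(kw, i) for the nonnegative i produced by range is exactly
-- PySem.Chars.startswith of the i-character drop of low; the final _LABELS[best] is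
-- guarded by best < 5, so the pyGet? is always `some` and .getD is exact.
def classify_cuisine_alt (name : String) : String :=
  let lowL := (PySem.Str.lower name).toList
  let best : Nat := (PySem.List.pyRange 0 ((lowL.length : Int) + 1) 1).foldl
      (fun best i => pvKW.foldl
        (fun b kp => if kp.2 < b && PySem.Chars.startswith (lowL.drop i.toNat) kp.1.toList then kp.2 else b) best) 5
  if best < 5 then (PySem.List.pyGet? pvLabels (best : Int)).getD "general" else "general"

-- ===== PRECONDITION & SPEC =====
def Spec_classify_cuisine (name : String) (out : String) : Prop := out = classify_cuisine_alt name
instance (name : String) (out : String) : Decidable (Spec_classify_cuisine name out) := by unfold Spec_classify_cuisine; infer_instance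

-- ===== CLAIM (what is proved, stated in full; the proofs are below) =====
def Claim_equal_classify_cuisine : Prop := ∀ (name : String), Dom_classify_cuisine name → Spec_classify_cuisine name (classify_cuisine name)

-- ===== LEMMAS AND PROOFS =====

-- inner loop of B (over the keyword table), as a named function for the proofs
def pvStep (s : List Char) (l : List (String × Nat)) (b : Nat) : Nat :=
  l.foldl (fun b kp => if kp.2 < b && PySem.Chars.startswith s kp.1.toList then kp.2 else b) b

-- outer loop of B (over a list of positions)
def pvScanR (lowL : List Char) (ps : List Nat) (b : Nat) : Nat :=
  ps.foldl (fun b k => pvStep (lowL.drop k) pvKW b) b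

theorem pvStep_le (s : List Char) (l : List (String × Nat)) : ∀ b, pvStep s l b ≤ b := by
  induction l with
  | nil => intro b; simp [pvStep]
  | cons kp l ih =>
    intro b
    simp only [pvStep, List.foldl_cons]
    refine le_trans (ih _) ?_
    split <;> rename_i h
    · have h' : kp.2 < b := by
        have := h
        simp only [Bool.and_eq_true, decide_eq_true_eq] at this
        exact this.1
      exact le_of_lt h'
    · exact le_rfl

theorem pvStep_le_of_mem (s : List Char) (l : List (String × Nat)) (kw : String) (p : Nat)
    (hmem : (kw, p) ∈ l) (hsw : PySem.Chars.startswith s kw.toList = true) :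
    ∀ b, pvStep s l b ≤ p := by
  induction l with
  | nil => cases hmem
  | cons kp l ih =>
    intro b
    rcases List.mem_cons.mp hmem with h | h
    · subst h
      simp only [pvStep, List.foldl_cons]
      by_cases hb : p < b
      · simp only [hb, hsw, decide_true, Bool.and_self, if_true]
        exact pvStep_le s l p
      · simp only [hsw, hb, decide_false, Bool.false_and, if_neg Bool.false_ne_true]
        exact le_trans (pvStep_le s l b) (Nat.le_of_not_lt hb)
    · simpa only [pvStep, List.foldl_cons] using ih h _

theorem pvStep_eq (s : List Char) (l : List (String × Nat)) :
    ∀ b q, pvStep s l b = q →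
      q = b ∨ ∃ kw p, (kw, p) ∈ l ∧ p = q ∧ PySem.Chars.startswith s kw.toList = true := by
  induction l with
  | nil => intro b q h; left; simpa [pvStep] using h.symm
  | cons kp l ih =>
    intro b q h
    simp only [pvStep, List.foldl_cons] at h
    rcases ih _ _ h with h1 | ⟨kw, p, hm, hp, hsw⟩
    · by_cases hc : (decide (kp.2 < b) && PySem.Chars.startswith s kp.1.toList) = true
      · right
        have hc' := hc
        simp only [Bool.and_eq_true] at hc'
        refine ⟨kp.1, kp.2, List.mem_cons_self, ?_, hc'.2⟩
        rw [h1, if_pos hc]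
      · left; rw [h1, if_neg hc]
    · exact Or.inr ⟨kw, p, List.mem_cons_of_mem _ hm, hp, hsw⟩

theorem pvScanR_le (lowL : List Char) (ps : List Nat) : ∀ b, pvScanR lowL ps b ≤ b := by
  induction ps with
  | nil => intro b; simp [pvScanR]
  | cons k ps ih =>
    intro b
    simp only [pvScanR, List.foldl_cons]
    exact le_trans (ih _) (pvStep_le _ _ _)

theorem pvScanR_le_of_mem (lowL : List Char) (ps : List Nat) (k : Nat) (kw : String) (p : Nat)
    (hk : k ∈ ps) (hmem : (kw, p) ∈ pvKW)
    (hsw : PySem.Chars.startswith (lowL.drop k) kw.toList = true) :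
    ∀ b, pvScanR lowL ps b ≤ p := by
  induction ps with
  | nil => cases hk
  | cons k' ps ih =>
    intro b
    rcases List.mem_cons.mp hk with h | h
    · subst h
      simp only [pvScanR, List.foldl_cons]
      exact le_trans (pvScanR_le lowL ps _) (pvStep_le_of_mem _ _ _ _ hmem hsw _)
    · simpa only [pvScanR, List.foldl_cons] using ih h _

theorem pvScanR_eq (lowL : List Char) (ps : List Nat) :
    ∀ b q, pvScanR lowL ps b = q →
      q = b ∨ ∃ k ∈ ps, ∃ kw p, (kw, p) ∈ pvKW ∧ p = q ∧
        PySem.Chars.startswith (lowL.drop k) kw.toList = true := by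
  induction ps with
  | nil => intro b q h; left; simpa [pvScanR] using h.symm
  | cons k ps ih =>
    intro b q h
    simp only [pvScanR, List.foldl_cons] at h
    rcases ih _ _ h with h1 | ⟨k', hk', kw, p, hm, hp, hsw⟩
    · rcases pvStep_eq _ _ _ _ h1.symm with h2 | ⟨kw, p, hm, hp, hsw⟩
      · exact Or.inl h2
      · exact Or.inr ⟨k, List.mem_cons_self, kw, p, hm, hp, hsw⟩
    · exact Or.inr ⟨k', List.mem_cons_of_mem _ hk', kw, p, hm, hp, hsw⟩

-- bridge: B's port equals the Nat-indexed scan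
theorem alt_eq (name : String) :
    classify_cuisine_alt name =
      (if pvScanR (PySem.Str.lower name).toList (List.range ((PySem.Str.lower name).toList.length + 1)) 5 < 5
       then (PySem.List.pyGet? pvLabels
         ((pvScanR (PySem.Str.lower name).toList (List.range ((PySem.Str.lower name).toList.length + 1)) 5 : Nat) : Int)).getD "general"
       else "general") := by
  simp only [classify_cuisine_alt, pvScanR, pvStep, PySem.List.pyRange_one, List.foldl_map,
    Int.sub_zero, Int.zero_add, Int.toNat_natCast]
  norm_num

-- the groups of A, indexed by priority (proof-side helper)
def pvGroup : Nat → List String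
  | 0 => ["dosa", "south", "kerala", "chettinad", "udupi", "madras", "idli", "appam", "malabar"]
  | 1 => ["sri lanka", "colombo", "jaffna", "ceylon", "hopper"]
  | 2 => ["nepal", "gurkha", "himalaya", "everest", "momo", "sherpa", "kathmandu"]
  | 3 => ["bangla", "dhaka", "bengal", "sylhet"]
  | 4 => ["tandoori", "punjab", "mughal", "nawab", "delhi", "lucknow", "biryani", "naan", "tikka", "butter chicken", "roti"]
  | _ => []

theorem pvKW_sound : ∀ kwp ∈ pvKW, kwp.2 < 5 ∧ kwp.1 ∈ pvGroup kwp.2 ∧ kwp.1.toList ≠ [] := by decide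

theorem pvKW_complete : ∀ p < 5, ∀ w ∈ pvGroup p, (w, p) ∈ pvKW := by decide

-- group p has a keyword occurring in lowL → the scan result is ≤ p
theorem pvScan_le_of_occ (lowL : List Char) (p : Nat) (w : String)
    (hw : w ∈ pvGroup p) (hp : p < 5)
    (hin : PySem.Chars.isIn w.toList lowL = true) :
    pvScanR lowL (List.range (lowL.length + 1)) 5 ≤ p := by
  have hmem : (w, p) ∈ pvKW := pvKW_complete p hp w hw
  obtain ⟨j, hj⟩ := (PySem.Chars.exists_prefix_drop_iff_isIn w.toList lowL).mpr hin
  have hne : w.toList ≠ [] := (pvKW_sound _ hmem).2.2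
  have hjlt : j < lowL.length + 1 := by
    by_contra hge
    have : lowL.drop j = [] := List.drop_eq_nil_of_le (by omega)
    rw [this] at hj
    exact hne (List.prefix_nil.mp hj)
  exact pvScanR_le_of_mem lowL _ j w p (List.mem_range.mpr hjlt) hmem
    ((PySem.Chars.startswith_iff _ _).mpr hj) 5

-- the scan result q, if < 5, is witnessed by a keyword of group q occurring in lowL
theorem pvScan_occ (lowL : List Char) (q : Nat)
    (h : pvScanR lowL (List.range (lowL.length + 1)) 5 = q) (hq : q < 5) :
    ∃ w ∈ pvGroup q, PySem.Chars.isIn w.toList lowL = true := by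
  rcases pvScanR_eq lowL _ _ _ h with h5 | ⟨k, _, kw, p, hm, hp, hsw⟩
  · omega
  · subst hp
    refine ⟨kw, (pvKW_sound _ hm).2.1, ?_⟩
    exact (PySem.Chars.exists_prefix_drop_iff_isIn kw.toList lowL).mp
      ⟨k, (PySem.Chars.startswith_iff _ _).mp hsw⟩

-- A's group-p condition as an existential over lowL
theorem any_iff (G : List String) (low : String) :
    (G.any (fun w => PySem.Str.isIn w low) = true) ↔
      ∃ w ∈ G, PySem.Chars.isIn w.toList low.toList = true := by
  simp [List.any_eq_true, PySem.Str.isIn_eq]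

-- ===== VERDICT (by name: the statement is the Claim_ definition above) =====
theorem classify_cuisine_spec : Claim_equal_classify_cuisine := by
  intro name _
  unfold Spec_classify_cuisine
  simp only [classify_cuisine]
  rw [alt_eq]
  set low := PySem.Str.lower name with hlow
  set lowL := low.toList with hlowL
  set best := pvScanR lowL (List.range (lowL.length + 1)) 5 with hbest
  have hle5 : best ≤ 5 := pvScanR_le _ _ _
  -- helper: condition of group p true → best ≤ p ; best = q < 5 → condition of group q true
  have hup : ∀ p, p < 5 → (pvGroup p).any (fun w => PySem.Str.isIn w low) = true → best ≤ p := by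
    intro p hp hany
    obtain ⟨w, hw, hin⟩ := (any_iff _ _).mp hany
    exact pvScan_le_of_occ lowL p w hw hp hin
  have hdown : ∀ q, best = q → q < 5 → (pvGroup q).any (fun w => PySem.Str.isIn w low) = true := by
    intro q h hq
    obtain ⟨w, hw, hin⟩ := pvScan_occ lowL q h hq
    exact (any_iff _ _).mpr ⟨w, hw, hin⟩
  interval_cases best
  · have h0 := hdown 0 rfl (by norm_num)
    simp only [pvGroup] at h0
    rw [if_pos h0]; decide
  · have h1 := hdown 1 rfl (by norm_num)
    have n0 : ¬ ((pvGroup 0).any (fun w => PySem.Str.isIn w low) = true) := fun h => by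
      have := hup 0 (by norm_num) h; omega
    simp only [pvGroup] at h1 n0
    rw [if_neg n0, if_pos h1]; decide
  · have h2 := hdown 2 rfl (by norm_num)
    have n0 : ¬ ((pvGroup 0).any (fun w => PySem.Str.isIn w low) = true) := fun h => by
      have := hup 0 (by norm_num) h; omega
    have n1 : ¬ ((pvGroup 1).any (fun w => PySem.Str.isIn w low) = true) := fun h => by
      have := hup 1 (by norm_num) h; omega
    simp only [pvGroup] at h2 n0 n1
    rw [if_neg n0, if_neg n1, if_pos h2]; decide
  · have h3 := hdown 3 rfl (by norm_num)
    have n0 : ¬ ((pvGroup 0).any (fun w => PySem.Str.isIn w low) = true) := fun h => by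
      have := hup 0 (by norm_num) h; omega
    have n1 : ¬ ((pvGroup 1).any (fun w => PySem.Str.isIn w low) = true) := fun h => by
      have := hup 1 (by norm_num) h; omega
    have n2 : ¬ ((pvGroup 2).any (fun w => PySem.Str.isIn w low) = true) := fun h => by
      have := hup 2 (by norm_num) h; omega
    simp only [pvGroup] at h3 n0 n1 n2
    rw [if_neg n0, if_neg n1, if_neg n2, if_pos h3]; decide
  · have h4 := hdown 4 rfl (by norm_num)
    have n0 : ¬ ((pvGroup 0).any (fun w => PySem.Str.isIn w low) = true) := fun h => by
      have := hup 0 (by norm_num) h; omega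
    have n1 : ¬ ((pvGroup 1).any (fun w => PySem.Str.isIn w low) = true) := fun h => by
      have := hup 1 (by norm_num) h; omega
    have n2 : ¬ ((pvGroup 2).any (fun w => PySem.Str.isIn w low) = true) := fun h => by
      have := hup 2 (by norm_num) h; omega
    have n3 : ¬ ((pvGroup 3).any (fun w => PySem.Str.isIn w low) = true) := fun h => by
      have := hup 3 (by norm_num) h; omega
    simp only [pvGroup] at h4 n0 n1 n2 n3
    rw [if_neg n0, if_neg n1, if_neg n2, if_neg n3, if_pos h4]; decide
  · have n0 : ¬ ((pvGroup 0).any (fun w => PySem.Str.isIn w low) = true) := fun h => by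
      have := hup 0 (by norm_num) h; omega
    have n1 : ¬ ((pvGroup 1).any (fun w => PySem.Str.isIn w low) = true) := fun h => by
      have := hup 1 (by norm_num) h; omega
    have n2 : ¬ ((pvGroup 2).any (fun w => PySem.Str.isIn w low) = true) := fun h => by
      have := hup 2 (by norm_num) h; omega
    have n3 : ¬ ((pvGroup 3).any (fun w => PySem.Str.isIn w low) = true) := fun h => by
      have := hup 3 (by norm_num) h; omega
    have n4 : ¬ ((pvGroup 4).any (fun w => PySem.Str.isIn w low) = true) := fun h => by
      have := hup 4 (by norm_num) h; omega
    simp only [pvGroup] at n0 n1 n2 n3 n4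
    rw [if_neg n0, if_neg n1, if_neg n2, if_neg n3, if_neg n4]
    decide
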